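-- pv_equiv track=rewrite | github.com/asefatesfay/dsa | sets/03_advanced_patterns.py | max_operations_correct
-- ===== SOURCE A (Python) =====
-- from typing import List, Set
-- from collections import defaultdict, Counter
--
-- def max_operations_correct(nums: List[int], k: int) -> int:
--     """Correct implementation"""
--     num_count = Counter(nums)
--     operations = 0
--
--     for num in list(num_count.keys()):
--         if num_count[num] == 0:
--             continue
--
--         complement = k - num
--
--         if complement == num:
--             # Pair same numbers: can make count//2 pairs
--             operations += num_count[num] // 2
--             num_count[num] = 0
--         elif complement in num_count:
--             # Pair different numbers: take min count
--             pairs = min(num_count[num], num_count[complement])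
--             operations += pairs
--             num_count[num] = 0
--             num_count[complement] = 0
--
--     return operations
-- ===== SOURCE B (Python) =====
-- from typing import List
-- from collections import Counter
--
-- def max_operations_correct(nums: List[int], k: int) -> int:
--     """One-pass greedy: match each element with a previously unmatched complement."""
--     need = Counter()
--     operations = 0
--     for x in nums:
--         if need[k - x] > 0:
--             need[k - x] -= 1
--             operations += 1
--         else:
--             need[x] += 1
--     return operations
-- ===== Notes on version B (the rewrite author's own statement) =====
-- stated objective: alternative
-- what changed: Replaced the Counter-keyed loop that zeroes out value classes pair-by-pair with a single left-to-right greedy scan that matches each element against a running Counter of still-unmatched complements.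
import Mathlib
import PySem

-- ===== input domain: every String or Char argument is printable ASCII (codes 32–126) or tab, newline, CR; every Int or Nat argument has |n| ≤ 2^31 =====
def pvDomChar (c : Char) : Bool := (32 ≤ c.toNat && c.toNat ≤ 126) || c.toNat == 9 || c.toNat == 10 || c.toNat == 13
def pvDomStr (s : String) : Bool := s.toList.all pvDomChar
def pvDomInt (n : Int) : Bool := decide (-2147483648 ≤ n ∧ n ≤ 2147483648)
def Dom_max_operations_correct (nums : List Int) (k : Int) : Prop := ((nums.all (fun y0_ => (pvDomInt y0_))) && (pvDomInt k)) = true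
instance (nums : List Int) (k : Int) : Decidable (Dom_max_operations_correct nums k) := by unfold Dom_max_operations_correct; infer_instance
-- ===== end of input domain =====

-- B replaces A's Counter-keyed zeroing loop by a one-pass greedy matcher (alternative algorithm, same return value).

-- ===== PORT A =====
def max_operations_correct (nums : List Int) (k : Int) : Int :=
  let num_count := PySem.Dict.counter nums
  (num_count.keys.foldl (fun (st : PySem.Dict Int Int × Int) num =>
      if st.1.getD num 0 = 0 then st
      else
        let complement := k - num
        if complement = num then
          (st.1.insert num 0, st.2 + PySem.Int.floordiv (st.1.getD num 0) 2)
        else if st.1.contains complement then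
          let pairs := min (st.1.getD num 0) (st.1.getD complement 0)
          ((st.1.insert num 0).insert complement 0, st.2 + pairs)
        else st)
    (num_count, 0)).2

-- ===== PORT B =====
def max_operations_correct_alt (nums : List Int) (k : Int) : Int :=
  (nums.foldl (fun (st : PySem.Dict Int Int × Int) x =>
      if st.1.getD (k - x) 0 > 0 then
        (st.1.insert (k - x) (st.1.getD (k - x) 0 - 1), st.2 + 1)
      else
        (st.1.insert x (st.1.getD x 0 + 1), st.2))
    (PySem.Dict.empty, 0)).2

-- ===== PRECONDITION & SPEC =====
def Spec_max_operations_correct (nums : List Int) (k : Int) (out : Int) : Prop := out = max_operations_correct_alt nums k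
instance (nums : List Int) (k : Int) (out : Int) : Decidable (Spec_max_operations_correct nums k out) := by unfold Spec_max_operations_correct; infer_instance

-- ===== CLAIM (what is proved, stated in full; the proofs are below) =====
def Claim_equal_max_operations_correct : Prop := ∀ (nums : List Int) (k : Int), Dom_max_operations_correct nums k → Spec_max_operations_correct nums k (max_operations_correct nums k)

-- ===== LEMMAS AND PROOFS =====

/-- Count of `v` in `p`, as an integer. -/
def pvCnt (p : List Int) (v : Int) : Int := (p.count v : Int)

/-- Whether appending `x` to the already-seen prefix `p` completes one more `k`-sum pair. -/
def pvDelta (p : List Int) (x k : Int) : Int :=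
  if 2 * x = k then (if pvCnt p x % 2 = 1 then 1 else 0)
  else if pvCnt p x < pvCnt p (k - x) then 1 else 0

/-- Common normal form: total pairs contributed by `l` after the prefix `p`. -/
def pvF (k : Int) (p l : List Int) : Int :=
  match l with
  | [] => 0
  | x :: r => pvDelta p x k + pvF k (p ++ [x]) r

lemma pvCnt_append (p : List Int) (x v : Int) :
    pvCnt (p ++ [x]) v = pvCnt p v + (if v = x then 1 else 0) := by
  by_cases h : v = x
  · subst h; simp [pvCnt, List.count_append]
  · have h' : ¬ x = v := fun e => h e.symm
    simp [pvCnt, List.count_append, h, h']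

lemma pvCnt_nonneg (p : List Int) (v : Int) : 0 ≤ pvCnt p v := by
  simp [pvCnt]

lemma pvCnt_pos_of_mem {p : List Int} {v : Int} (h : v ∈ p) : 1 ≤ pvCnt p v := by
  have := List.count_pos_iff.mpr h
  simp only [pvCnt]; omega

lemma pvCnt_eq_zero_of_not_mem {p : List Int} {v : Int} (h : v ∉ p) : pvCnt p v = 0 := by
  simp [pvCnt, List.count_eq_zero_of_not_mem h]

lemma pvF_append (k : Int) (p l : List Int) (x : Int) :
    pvF k p (l ++ [x]) = pvF k p l + pvDelta (p ++ l) x k := by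
  induction l generalizing p with
  | nil => simp [pvF]
  | cons a r ih =>
    simp only [List.cons_append, pvF, ih, List.append_assoc, List.nil_append]
    ring

-- ===== B-side: the greedy loop computes pvF =====

/-- Invariant value of B's `need` counter after scanning the prefix `p`. -/
def pvNeedSpec (p : List Int) (k v : Int) : Int :=
  if 2 * v = k then pvCnt p v % 2 else max (pvCnt p v - pvCnt p (k - v)) 0

lemma B_loop (k : Int) (l : List Int) : ∀ (p : List Int) (need : PySem.Dict Int Int) (ops : Int),
    (∀ v, need.getD v 0 = pvNeedSpec p k v) →
    (l.foldl (fun (st : PySem.Dict Int Int × Int) x =>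
      if st.1.getD (k - x) 0 > 0 then
        (st.1.insert (k - x) (st.1.getD (k - x) 0 - 1), st.2 + 1)
      else
        (st.1.insert x (st.1.getD x 0 + 1), st.2)) (need, ops)).2 = ops + pvF k p l := by
  induction l with
  | nil => intro p need ops _; simp [pvF]
  | cons x r ih =>
    intro p need ops hinv
    have hxk : k - (k - x) = x := by omega
    have hc' := hinv (k - x)
    simp only [pvNeedSpec, hxk] at hc'
    simp only [List.foldl_cons]
    by_cases hk : 2 * x = k
    · have hwx : k - x = x := by omega
      rw [hwx] at hc' ⊢
      rw [if_pos hk] at hc'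
      by_cases hcond : need.getD x 0 > 0
      · rw [if_pos hcond]
        rw [hc'] at hcond ⊢
        rw [ih (p ++ [x])]
        · simp only [pvF, pvDelta, if_pos hk, if_pos (show pvCnt p x % 2 = 1 by omega)]
          ring
        · intro v
          by_cases hv : v = x
          · subst hv
            rw [PySem.Dict.getD_insert_self]
            simp only [pvNeedSpec, pvCnt_append, if_pos hk]
            split_ifs <;> omega
          · rw [PySem.Dict.getD_insert_of_ne _ _ _ hv, hinv v]
            have h2 : ¬ ((k - v : Int) = x) := by omega
            simp only [pvNeedSpec, pvCnt_append]
            split_ifs <;> omega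
      · rw [if_neg hcond]
        rw [hc'] at hcond ⊢
        rw [ih (p ++ [x])]
        · simp only [pvF, pvDelta, if_pos hk, if_neg (show ¬ (pvCnt p x % 2 = 1) by omega)]
          ring
        · intro v
          by_cases hv : v = x
          · subst hv
            rw [PySem.Dict.getD_insert_self]
            simp only [pvNeedSpec, pvCnt_append, if_pos hk]
            split_ifs <;> omega
          · rw [PySem.Dict.getD_insert_of_ne _ _ _ hv, hinv v]
            have h2 : ¬ ((k - v : Int) = x) := by omega
            simp only [pvNeedSpec, pvCnt_append]
            split_ifs <;> omega
    · have hkk : ¬ (2 * (k - x) = k) := by omega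
      rw [if_neg hkk] at hc'
      by_cases hcond : need.getD (k - x) 0 > 0
      · rw [if_pos hcond]
        rw [hc'] at hcond
        rw [ih (p ++ [x])]
        · simp only [pvF, pvDelta, if_neg hk,
            if_pos (show pvCnt p x < pvCnt p (k - x) by omega)]
          ring
        · intro v
          by_cases hv : v = k - x
          · subst hv
            rw [PySem.Dict.getD_insert_self, hc']
            simp only [pvNeedSpec, pvCnt_append, hxk]
            split_ifs <;> omega
          · rw [PySem.Dict.getD_insert_of_ne _ _ _ hv, hinv v]
            by_cases hvx : v = x
            · subst hvx
              simp only [pvNeedSpec, pvCnt_append]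
              split_ifs <;> omega
            · have h2 : ¬ ((k - v : Int) = x) := by omega
              simp only [pvNeedSpec, pvCnt_append]
              split_ifs <;> omega
      · rw [if_neg hcond]
        rw [hc'] at hcond
        rw [ih (p ++ [x])]
        · simp only [pvF, pvDelta, if_neg hk,
            if_neg (show ¬ (pvCnt p x < pvCnt p (k - x)) by omega)]
          ring
        · intro v
          by_cases hv : v = x
          · subst hv
            rw [PySem.Dict.getD_insert_self, hinv v]
            simp only [pvNeedSpec, pvCnt_append]
            split_ifs <;> omega
          · rw [PySem.Dict.getD_insert_of_ne _ _ _ hv, hinv v]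
            by_cases hvw : v = k - x
            · subst hvw
              simp only [pvNeedSpec, pvCnt_append, hxk]
              split_ifs <;> omega
            · have h2 : ¬ ((k - v : Int) = x) := by omega
              simp only [pvNeedSpec, pvCnt_append]
              split_ifs <;> omega

lemma B_eq_F (nums : List Int) (k : Int) :
    max_operations_correct_alt nums k = pvF k [] nums := by
  unfold max_operations_correct_alt
  rw [B_loop k nums [] PySem.Dict.empty 0]
  · ring
  · intro v
    have h0 : (PySem.Dict.empty : PySem.Dict Int Int).getD v 0 = 0 := by simp [pysem]
    rw [h0]
    unfold pvNeedSpec pvCnt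
    simp

-- ===== A-side: the zeroing loop over the counter's keys computes a positional sum =====

lemma pv_disj {l1 l2 : List Int} (h : (l1 ++ l2).Nodup) {u : Int}
    (h1 : u ∈ l1) (h2 : u ∈ l2) : False := by
  obtain ⟨s, t, rfl⟩ := List.append_of_mem h1
  rw [List.append_assoc, List.cons_append, List.nodup_middle, List.nodup_cons] at h
  exact h.1 (List.mem_append.mpr (Or.inr (List.mem_append.mpr (Or.inr h2))))

lemma nodup_split₂ {l1 l2 : List Int} {a : Int}
    (h : (l1 ++ a :: l2).Nodup) : a ∉ l1 ∧ a ∉ l2 ∧ (l1 ++ l2).Nodup := by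
  rw [List.nodup_middle, List.nodup_cons, List.mem_append] at h
  exact ⟨fun hm => h.1 (Or.inl hm), fun hm => h.1 (Or.inr hm), h.2⟩

lemma nodup_split₃ {m1 m2 m3 : List Int} {a b : Int}
    (h : (m1 ++ a :: (m2 ++ b :: m3)).Nodup) :
    a ∉ m1 ∧ a ∉ m2 ∧ a ∉ m3 ∧ a ≠ b ∧ b ∉ m1 ∧ b ∉ m2 ∧ b ∉ m3 := by
  obtain ⟨ha1, ha2, hrest⟩ := nodup_split₂ h
  have hrest' : ((m1 ++ m2) ++ b :: m3).Nodup := by rwa [List.append_assoc]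
  obtain ⟨hb1, hb3, _⟩ := nodup_split₂ hrest'
  simp only [List.mem_append, List.mem_cons, not_or] at ha2 hb1
  exact ⟨ha1, ha2.1, ha2.2.2, ha2.2.1, hb1.1, hb1.2, hb3⟩

/-- Contribution of key `v` in A's loop, given the already-processed keys `P`. -/
def pvG (nums : List Int) (k v : Int) (P : List Int) : Int :=
  if k - v ≠ v ∧ (k - v) ∈ P then 0
  else if k - v = v then PySem.Int.floordiv (pvCnt nums v) 2
  else min (pvCnt nums v) (pvCnt nums (k - v))

/-- Positional sum of `pvG` over a key list. -/
def pvAG (nums : List Int) (k : Int) (P l : List Int) : Int :=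
  match l with
  | [] => 0
  | v :: r => pvG nums k v P + pvAG nums k (P ++ [v]) r

lemma pvAG_append (q : List Int) (k : Int) (l1 : List Int) : ∀ (P l2 : List Int),
    pvAG q k P (l1 ++ l2) = pvAG q k P l1 + pvAG q k (P ++ l1) l2 := by
  induction l1 with
  | nil => intro P l2; simp [pvAG]
  | cons a r ih =>
    intro P l2
    simp only [List.cons_append, pvAG, ih (P ++ [a]) l2, List.append_assoc,
      List.nil_append]
    ring

lemma pvG_congr (p : List Int) (k x v : Int) (P : List Int) (h1 : v ≠ x) (h2 : v ≠ k - x) :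
    pvG (p ++ [x]) k v P = pvG p k v P := by
  have hkv : ¬ ((k - v : Int) = x) := by omega
  simp only [pvG, pvCnt_append, if_neg h1, if_neg hkv, add_zero]

lemma pvAG_congr (p : List Int) (k x : Int) (l : List Int)
    (h : ∀ v ∈ l, v ≠ x ∧ v ≠ k - x) :
    ∀ P, pvAG (p ++ [x]) k P l = pvAG p k P l := by
  induction l with
  | nil => intro P; rfl
  | cons a r ih =>
    intro P
    have ha := h a (List.mem_cons_self ..)
    simp only [pvAG, pvG_congr p k x a P ha.1 ha.2,
      ih (fun v hv => h v (List.mem_cons_of_mem _ hv)) (P ++ [a])]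

lemma A_loop (nums : List Int) (k : Int) (rest : List Int) :
    ∀ (P : List Int) (d : PySem.Dict Int Int) (ops : Int),
    PySem.List.dedup nums = P ++ rest →
    (∀ v, d.contains v = nums.contains v) →
    (∀ v ∈ rest, d.getD v 0 = if k - v ≠ v ∧ (k - v) ∈ P then 0 else pvCnt nums v) →
    (rest.foldl (fun (st : PySem.Dict Int Int × Int) num =>
      if st.1.getD num 0 = 0 then st
      else
        let complement := k - num
        if complement = num then
          (st.1.insert num 0, st.2 + PySem.Int.floordiv (st.1.getD num 0) 2)
        else if st.1.contains complement then
          let pairs := min (st.1.getD num 0) (st.1.getD complement 0)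
          ((st.1.insert num 0).insert complement 0, st.2 + pairs)
        else st) (d, ops)).2 = ops + pvAG nums k P rest := by
  induction rest with
  | nil => intro P d ops _ _ _; simp [pvAG]
  | cons v r ih =>
    intro P d ops hK hcont hinv
    have hnd : (P ++ v :: r).Nodup := by
      have := PySem.List.nodup_dedup nums; rwa [hK] at this
    obtain ⟨hvP, hvr, hndPr⟩ := nodup_split₂ hnd
    have hmem : ∀ u, u ∈ nums ↔ u ∈ P ++ v :: r := by
      intro u; rw [← hK, PySem.List.mem_dedup]
    have hvnum : v ∈ nums := (hmem v).mpr (by simp)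
    have hcv : 1 ≤ pvCnt nums v := pvCnt_pos_of_mem hvnum
    have hgv := hinv v (List.mem_cons_self ..)
    simp only [List.foldl_cons]
    by_cases hz : k - v ≠ v ∧ (k - v) ∈ P
    · -- v was zeroed when its earlier partner was processed: skipped
      rw [if_pos hz] at hgv
      rw [if_pos (by rw [hgv])]
      rw [ih (P ++ [v]) d ops (by rw [hK]; simp) hcont]
      · simp only [pvAG, pvG, if_pos hz, zero_add]
      · intro u hu
        have hukv : u ≠ k - v := by
          intro e
          exact pv_disj hnd hz.2 (List.mem_cons_of_mem _ (e ▸ hu))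
        have hiff : ((k - u) ∈ P ++ [v]) ↔ ((k - u) ∈ P) := by
          simp only [List.mem_append, List.mem_singleton]
          constructor
          · rintro (h | h)
            · exact h
            · exact absurd (by omega : u = k - v) hukv
          · exact Or.inl
        rw [hinv u (List.mem_cons_of_mem _ hu)]
        by_cases hc1 : k - u ≠ u ∧ (k - u) ∈ P
        · rw [if_pos hc1, if_pos ⟨hc1.1, hiff.mpr hc1.2⟩]
        · rw [if_neg hc1, if_neg (by rw [hiff]; exact hc1)]
    · -- v still carries its full count
      rw [if_neg hz] at hgv
      rw [if_neg (by rw [hgv]; omega)]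
      by_cases hm : k - v = v
      · -- middle value: pairs with itself
        rw [if_pos hm]
        rw [ih (P ++ [v]) (d.insert v 0) (ops + PySem.Int.floordiv (d.getD v 0) 2)
            (by rw [hK]; simp)]
        · rw [hgv]
          simp only [pvAG, pvG, if_neg (show ¬ (k - v ≠ v ∧ (k - v) ∈ P) by simp [hm]),
            if_pos hm]
          ring
        · intro u
          rw [PySem.Dict.contains_insert, hcont u]
          by_cases huv : u = v
          · subst huv
            simp [hvnum]
          · rw [beq_eq_false_iff_ne.mpr huv]
            simp
        · intro u hu
          have huv : u ≠ v := fun e => hvr (e ▸ hu)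
          rw [PySem.Dict.getD_insert_of_ne _ _ _ huv, hinv u (List.mem_cons_of_mem _ hu)]
          have hukv : ¬ ((k - u) = v) := by
            intro e
            exact huv (by omega)
          have hiff : ((k - u) ∈ P ++ [v]) ↔ ((k - u) ∈ P) := by
            simp [List.mem_append, hukv]
          by_cases hc1 : k - u ≠ u ∧ (k - u) ∈ P
          · rw [if_pos hc1, if_pos ⟨hc1.1, hiff.mpr hc1.2⟩]
          · rw [if_neg hc1, if_neg (by rw [hiff]; exact hc1)]
      · -- genuine pair, k - v ≠ v; by ¬hz its partner is not yet processed
        have hwP : (k - v) ∉ P := fun h => hz ⟨hm, h⟩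
        rw [if_neg hm]
        by_cases hw : (k - v) ∈ nums
        · -- partner key exists: both are zeroed
          have hwr : (k - v) ∈ r := by
            rcases List.mem_append.mp ((hmem _).mp hw) with h | h
            · exact absurd h hwP
            · rcases List.mem_cons.mp h with h' | h'
              · exact absurd h' hm
              · exact h'
          have hgw := hinv (k - v) (List.mem_cons_of_mem _ hwr)
          have hkkv : k - (k - v) = v := by omega
          rw [if_neg (by rw [hkkv]; exact fun h => hvP h.2)] at hgw
          rw [if_pos (by rw [hcont]; simp [hw])]
          rw [ih (P ++ [v]) ((d.insert v 0).insert (k - v) 0)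
              (ops + min (d.getD v 0) (d.getD (k - v) 0)) (by rw [hK]; simp)]
          · rw [hgv, hgw]
            simp only [pvAG, pvG, if_neg hz, if_neg hm]
            ring
          · intro u
            rw [PySem.Dict.contains_insert, PySem.Dict.contains_insert, hcont u]
            by_cases huw : u = k - v
            · subst huw
              simp [hw]
            · by_cases huv : u = v
              · subst huv
                rw [beq_eq_false_iff_ne.mpr huw]
                simp [hvnum]
              · rw [beq_eq_false_iff_ne.mpr huw, beq_eq_false_iff_ne.mpr huv]
                simp
          · intro u hu
            have huv : u ≠ v := fun e => hvr (e ▸ hu)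
            by_cases huw : u = k - v
            · subst huw
              rw [PySem.Dict.getD_insert_self]
              rw [if_pos ⟨by omega, by simp [hkkv]⟩]
            · rw [PySem.Dict.getD_insert_of_ne _ _ _ huw,
                PySem.Dict.getD_insert_of_ne _ _ _ huv,
                hinv u (List.mem_cons_of_mem _ hu)]
              have hukv : ¬ ((k - u) = v) := fun e => huw (by omega)
              have hiff : ((k - u) ∈ P ++ [v]) ↔ ((k - u) ∈ P) := by
                simp [List.mem_append, hukv]
              by_cases hc1 : k - u ≠ u ∧ (k - u) ∈ P
              · rw [if_pos hc1, if_pos ⟨hc1.1, hiff.mpr hc1.2⟩]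
              · rw [if_neg hc1, if_neg (by rw [hiff]; exact hc1)]
        · -- partner absent: its count is 0, the min-term is 0
          rw [if_neg (by rw [hcont]; simp [hw])]
          rw [ih (P ++ [v]) d ops (by rw [hK]; simp) hcont]
          · have hcw : pvCnt nums (k - v) = 0 := pvCnt_eq_zero_of_not_mem hw
            simp only [pvAG, pvG, if_neg hz, if_neg hm]
            have hmin : min (pvCnt nums v) (pvCnt nums (k - v)) = 0 := by
              rw [hcw]; omega
            rw [hmin]; ring
          · intro u hu
            have hunum : u ∈ nums := (hmem u).mpr (by simp [List.mem_cons_of_mem _ hu])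
            have hukv : ¬ ((k - u) = v) := by
              intro e
              exact hw (by rw [(by omega : k - v = u)]; exact hunum)
            have hiff : ((k - u) ∈ P ++ [v]) ↔ ((k - u) ∈ P) := by
              simp [List.mem_append, hukv]
            rw [hinv u (List.mem_cons_of_mem _ hu)]
            by_cases hc1 : k - u ≠ u ∧ (k - u) ∈ P
            · rw [if_pos hc1, if_pos ⟨hc1.1, hiff.mpr hc1.2⟩]
            · rw [if_neg hc1, if_neg (by rw [hiff]; exact hc1)]

lemma A_eq_AG (nums : List Int) (k : Int) :
    max_operations_correct nums k = pvAG nums k [] (PySem.List.dedup nums) := by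
  have hkeys : (PySem.Dict.counter (κ := Int) nums).keys = PySem.List.dedup nums := by
    rw [PySem.Dict.keys_counter, PySem.List.dedup_eq_ofList]
  show ((PySem.Dict.counter (κ := Int) nums).keys.foldl
      (fun (st : PySem.Dict Int Int × Int) num =>
      if st.1.getD num 0 = 0 then st
      else
        let complement := k - num
        if complement = num then
          (st.1.insert num 0, st.2 + PySem.Int.floordiv (st.1.getD num 0) 2)
        else if st.1.contains complement then
          let pairs := min (st.1.getD num 0) (st.1.getD complement 0)
          ((st.1.insert num 0).insert complement 0, st.2 + pairs)
        else st)
    (PySem.Dict.counter nums, 0)).2 = pvAG nums k [] (PySem.List.dedup nums)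
  rw [hkeys]
  rw [A_loop nums k (PySem.List.dedup nums) [] (PySem.Dict.counter nums) 0 (by simp)
      (fun v => PySem.Dict.contains_counter nums v)]
  · ring
  · intro v _
    rw [if_neg (by simp)]
    exact PySem.Dict.getD_counter nums v

lemma AG_delta (p : List Int) (x k : Int) :
    pvAG (p ++ [x]) k [] (PySem.List.dedup (p ++ [x]))
      = pvAG p k [] (PySem.List.dedup p) + pvDelta p x k := by
  have hDD : PySem.List.dedup (p ++ [x])
      = if x ∈ p then PySem.List.dedup p else PySem.List.dedup p ++ [x] := by
    rw [PySem.List.dedup_eq_ofList, PySem.Set.ofList_append_singleton]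
    by_cases hx : x ∈ p
    · rw [if_pos hx, PySem.Set.add_of_mem (by rw [PySem.Set.mem_ofList]; exact hx),
        PySem.List.dedup_eq_ofList]
    · rw [if_neg hx, PySem.Set.add_of_not_mem (by rw [PySem.Set.mem_ofList]; exact hx),
        PySem.List.dedup_eq_ofList]
  have hndD : (PySem.List.dedup p).Nodup := PySem.List.nodup_dedup p
  have hmemD : ∀ u, u ∈ PySem.List.dedup p ↔ u ∈ p := fun u => PySem.List.mem_dedup p u
  have hc1 : pvCnt (p ++ [x]) x = pvCnt p x + 1 := by rw [pvCnt_append]; simp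
  have hc2 : ∀ u, u ≠ x → pvCnt (p ++ [x]) u = pvCnt p u := by
    intro u hu; rw [pvCnt_append, if_neg hu, add_zero]
  by_cases hk : 2 * x = k
  · -- middle value: x is its own complement
    have hw : k - x = x := by omega
    have hδ : pvDelta p x k = if pvCnt p x % 2 = 1 then 1 else 0 := by
      simp only [pvDelta, if_pos hk]
    by_cases hx : x ∈ p
    · obtain ⟨l1, l2, hD⟩ := List.append_of_mem ((hmemD x).mpr hx)
      obtain ⟨hx1, hx2, -⟩ := nodup_split₂ (hD ▸ hndD)
      rw [hDD, if_pos hx, hD]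
      rw [pvAG_append (p ++ [x]) k l1 [] (x :: l2), pvAG_append p k l1 [] (x :: l2)]
      simp only [pvAG, List.nil_append]
      rw [pvAG_congr p k x l1 (fun u hu => ⟨fun e => hx1 (e ▸ hu),
            fun e => hx1 (by rw [hw] at e; exact e ▸ hu)⟩) []]
      rw [pvAG_congr p k x l2 (fun u hu => ⟨fun e => hx2 (e ▸ hu),
            fun e => hx2 (by rw [hw] at e; exact e ▸ hu)⟩) (l1 ++ [x])]
      have hGx : ∀ q : List Int, pvG q k x l1 = PySem.Int.floordiv (pvCnt q x) 2 := by
        intro q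
        simp only [pvG, hw]
        rw [if_neg (by simp)]
        simp
      rw [hGx, hGx, hc1, hδ]
      rw [PySem.Int.floordiv_eq_ediv_of_pos (by norm_num),
        PySem.Int.floordiv_eq_ediv_of_pos (by norm_num)]
      have := pvCnt_nonneg p x
      split_ifs <;> omega
    · rw [hDD, if_neg hx, pvAG_append (p ++ [x]) k (PySem.List.dedup p) [] [x]]
      rw [pvAG_congr p k x (PySem.List.dedup p)
          (fun u hu => ⟨fun e => hx (e ▸ ((hmemD u).mp hu)),
            fun e => hx (by rw [hw] at e; exact e ▸ ((hmemD u).mp hu))⟩) []]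
      have hGx : pvG (p ++ [x]) k x ([] ++ PySem.List.dedup p) = 0 := by
        simp only [pvG, hw]
        rw [if_neg (by simp)]
        simp only [if_true]
        rw [hc1, pvCnt_eq_zero_of_not_mem hx]
        decide
      simp only [pvAG, hGx, add_zero]
      rw [hδ, pvCnt_eq_zero_of_not_mem hx]
      norm_num
  · -- genuine pair: k - x ≠ x
    have hwx : ¬ ((k - x : Int) = x) := by omega
    have hxkx : ¬ ((x : Int) = k - x) := by omega
    have hxk : k - (k - x) = x := by omega
    have hδ : pvDelta p x k = if pvCnt p x < pvCnt p (k - x) then 1 else 0 := by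
      simp only [pvDelta, if_neg hk]
    by_cases hx : x ∈ p
    · by_cases hwp : (k - x) ∈ p
      · -- both values present: the earlier key's min-term grows by [cx < cw]
        obtain ⟨l1, l2, hD⟩ := List.append_of_mem ((hmemD x).mpr hx)
        have hwD : (k - x) ∈ l1 ++ x :: l2 := hD ▸ ((hmemD _).mpr hwp)
        rcases List.mem_append.mp hwD with hwl | hwl
        · -- k - x comes first
          obtain ⟨m1, m2, hL⟩ := List.append_of_mem hwl
          rw [hL] at hD
          rw [List.append_assoc, List.cons_append] at hD
          obtain ⟨hw1, hw2, hw3, hne, hxm1, hxm2, hxl2⟩ := nodup_split₃ (hD ▸ hndD)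
          rw [hDD, if_pos hx, hD]
          have dec : ∀ q : List Int,
              pvAG q k [] (m1 ++ (k - x) :: (m2 ++ x :: l2))
                = pvAG q k [] m1 + pvG q k (k - x) ([] ++ m1)
                  + (pvAG q k (([] ++ m1) ++ [k - x]) m2
                  + (pvG q k x ((([] ++ m1) ++ [k - x]) ++ m2)
                  + pvAG q k (((([] ++ m1) ++ [k - x]) ++ m2) ++ [x]) l2)) := by
            intro q
            rw [pvAG_append q k m1 [] ((k - x) :: (m2 ++ x :: l2))]
            simp only [pvAG]
            rw [pvAG_append q k m2 (([] ++ m1) ++ [k - x]) (x :: l2)]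
            simp only [pvAG]
            ring
          rw [dec, dec]
          rw [pvAG_congr p k x m1 (fun u hu => ⟨fun e => hxm1 (e ▸ hu),
            fun e => hw1 (e ▸ hu)⟩)]
          rw [pvAG_congr p k x m2 (fun u hu => ⟨fun e => hxm2 (e ▸ hu),
            fun e => hw2 (e ▸ hu)⟩)]
          rw [pvAG_congr p k x l2 (fun u hu => ⟨fun e => hxl2 (e ▸ hu),
            fun e => hw3 (e ▸ hu)⟩)]
          have hGw : ∀ q : List Int, pvG q k (k - x) ([] ++ m1)
              = min (pvCnt q (k - x)) (pvCnt q x) := by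
            intro q
            simp only [pvG, hxk]
            rw [if_neg (by rintro ⟨-, h⟩; exact hxm1 (by simpa using h)), if_neg hxkx]
          have hGx : ∀ q : List Int, pvG q k x ((([] ++ m1) ++ [k - x]) ++ m2) = 0 := by
            intro q
            simp only [pvG]
            rw [if_pos ⟨hwx, by simp⟩]
          rw [hGw, hGw, hGx, hGx, hc1, hc2 (k - x) hwx, hδ]
          have h1 := pvCnt_nonneg p x
          have h2 := pvCnt_nonneg p (k - x)
          split_ifs <;> omega
        · -- x comes first
          have hwl2 : (k - x) ∈ l2 := by
            rcases List.mem_cons.mp hwl with he | h'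
            · exact absurd he hwx
            · exact h'
          obtain ⟨m1, m2, hL⟩ := List.append_of_mem hwl2
          rw [hL] at hD
          obtain ⟨hxl1, hxm1, hxm2, hne, hw1, hw2, hw3⟩ := nodup_split₃ (hD ▸ hndD)
          rw [hDD, if_pos hx, hD]
          have dec : ∀ q : List Int,
              pvAG q k [] (l1 ++ x :: (m1 ++ (k - x) :: m2))
                = pvAG q k [] l1 + pvG q k x ([] ++ l1)
                  + (pvAG q k (([] ++ l1) ++ [x]) m1
                  + (pvG q k (k - x) ((([] ++ l1) ++ [x]) ++ m1)
                  + pvAG q k (((([] ++ l1) ++ [x]) ++ m1) ++ [k - x]) m2)) := by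
            intro q
            rw [pvAG_append q k l1 [] (x :: (m1 ++ (k - x) :: m2))]
            simp only [pvAG]
            rw [pvAG_append q k m1 (([] ++ l1) ++ [x]) ((k - x) :: m2)]
            simp only [pvAG]
            ring
          rw [dec, dec]
          rw [pvAG_congr p k x l1 (fun u hu => ⟨fun e => hxl1 (e ▸ hu),
            fun e => hw1 (e ▸ hu)⟩)]
          rw [pvAG_congr p k x m1 (fun u hu => ⟨fun e => hxm1 (e ▸ hu),
            fun e => hw2 (e ▸ hu)⟩)]
          rw [pvAG_congr p k x m2 (fun u hu => ⟨fun e => hxm2 (e ▸ hu),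
            fun e => hw3 (e ▸ hu)⟩)]
          have hGx : ∀ q : List Int, pvG q k x ([] ++ l1)
              = min (pvCnt q x) (pvCnt q (k - x)) := by
            intro q
            simp only [pvG]
            rw [if_neg (by rintro ⟨-, h⟩; exact hw1 (by simpa using h)), if_neg hwx]
          have hGw : ∀ q : List Int, pvG q k (k - x) ((([] ++ l1) ++ [x]) ++ m1) = 0 := by
            intro q
            simp only [pvG, hxk]
            rw [if_pos ⟨fun e => hxkx e, by simp⟩]
          rw [hGx, hGx, hGw, hGw, hc1, hc2 (k - x) hwx, hδ]
          have h1 := pvCnt_nonneg p x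
          have h2 := pvCnt_nonneg p (k - x)
          split_ifs <;> omega
      · -- partner absent: nothing changes
        obtain ⟨l1, l2, hD⟩ := List.append_of_mem ((hmemD x).mpr hx)
        obtain ⟨hx1, hx2, -⟩ := nodup_split₂ (hD ▸ hndD)
        have hwD : (k - x) ∉ PySem.List.dedup p := fun h => hwp ((hmemD _).mp h)
        have hwl1 : (k - x) ∉ l1 := fun h => hwD (hD ▸ List.mem_append.mpr (Or.inl h))
        have hwl2 : (k - x) ∉ l2 :=
          fun h => hwD (hD ▸ List.mem_append.mpr (Or.inr (List.mem_cons_of_mem _ h)))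
        rw [hDD, if_pos hx, hD]
        rw [pvAG_append (p ++ [x]) k l1 [] (x :: l2), pvAG_append p k l1 [] (x :: l2)]
        simp only [pvAG, List.nil_append]
        rw [pvAG_congr p k x l1 (fun u hu => ⟨fun e => hx1 (e ▸ hu),
          fun e => hwl1 (e ▸ hu)⟩) []]
        rw [pvAG_congr p k x l2 (fun u hu => ⟨fun e => hx2 (e ▸ hu),
          fun e => hwl2 (e ▸ hu)⟩) (l1 ++ [x])]
        have hGx : ∀ q : List Int, pvG q k x l1
            = min (pvCnt q x) (pvCnt q (k - x)) := by
          intro q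
          simp only [pvG]
          rw [if_neg (fun h => hwl1 h.2), if_neg hwx]
        rw [hGx, hGx, hc1, hc2 (k - x) hwx, hδ]
        rw [pvCnt_eq_zero_of_not_mem hwp]
        have h1 := pvCnt_nonneg p x
        split_ifs <;> omega
    · by_cases hwp : (k - x) ∈ p
      · -- new value x whose partner is already present
        obtain ⟨m1, m2, hD⟩ := List.append_of_mem ((hmemD _).mpr hwp)
        obtain ⟨hw1, hw2, -⟩ := nodup_split₂ (hD ▸ hndD)
        have hxD : x ∉ PySem.List.dedup p := fun h => hx ((hmemD _).mp h)
        rw [hDD, if_neg hx]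
        rw [pvAG_append (p ++ [x]) k (PySem.List.dedup p) [] [x]]
        simp only [pvAG, add_zero, List.nil_append]
        rw [hD]
        rw [pvAG_append (p ++ [x]) k m1 [] ((k - x) :: m2),
          pvAG_append p k m1 [] ((k - x) :: m2)]
        simp only [pvAG, List.nil_append]
        have hxm1 : x ∉ m1 := fun h => hxD (hD ▸ List.mem_append.mpr (Or.inl h))
        have hxm2 : x ∉ m2 :=
          fun h => hxD (hD ▸ List.mem_append.mpr (Or.inr (List.mem_cons_of_mem _ h)))
        rw [pvAG_congr p k x m1 (fun u hu => ⟨fun e => hxm1 (e ▸ hu),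
          fun e => hw1 (e ▸ hu)⟩) []]
        rw [pvAG_congr p k x m2 (fun u hu => ⟨fun e => hxm2 (e ▸ hu),
          fun e => hw2 (e ▸ hu)⟩) (m1 ++ [k - x])]
        have hGw : ∀ q : List Int, pvG q k (k - x) m1
            = min (pvCnt q (k - x)) (pvCnt q x) := by
          intro q
          simp only [pvG, hxk]
          rw [if_neg (fun h => hxm1 h.2), if_neg hxkx]
        have hGx : pvG (p ++ [x]) k x (m1 ++ (k - x) :: m2) = 0 := by
          simp only [pvG]
          rw [if_pos ⟨hwx, List.mem_append.mpr (Or.inr (List.mem_cons_self ..))⟩]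
        rw [hGw, hGw, hGx, hc1, hc2 (k - x) hwx, hδ]
        rw [pvCnt_eq_zero_of_not_mem hx]
        have h2 := pvCnt_pos_of_mem hwp
        split_ifs <;> omega
      · -- both new
        have hxD : x ∉ PySem.List.dedup p := fun h => hx ((hmemD _).mp h)
        have hwD : (k - x) ∉ PySem.List.dedup p := fun h => hwp ((hmemD _).mp h)
        rw [hDD, if_neg hx]
        rw [pvAG_append (p ++ [x]) k (PySem.List.dedup p) [] [x]]
        simp only [pvAG, add_zero, List.nil_append]
        rw [pvAG_congr p k x (PySem.List.dedup p)
          (fun u hu => ⟨fun e => hxD (e ▸ hu), fun e => hwD (e ▸ hu)⟩) []]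
        have hGx : pvG (p ++ [x]) k x (PySem.List.dedup p) = 0 := by
          simp only [pvG]
          rw [if_neg (fun h => hwD h.2), if_neg hwx, hc1, hc2 (k - x) hwx,
            pvCnt_eq_zero_of_not_mem hx, pvCnt_eq_zero_of_not_mem hwp]
          decide
        rw [hGx, hδ]
        rw [pvCnt_eq_zero_of_not_mem hx, pvCnt_eq_zero_of_not_mem hwp]
        norm_num

lemma A_eq_F (nums : List Int) (k : Int) :
    pvAG nums k [] (PySem.List.dedup nums) = pvF k [] nums := by
  induction nums using List.reverseRecOn with
  | nil => rfl
  | append_singleton p x ih =>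
    rw [AG_delta, ih, pvF_append]
    simp

-- ===== VERDICT (by name: the statement is the Claim_ definition above) =====
theorem max_operations_correct_spec : Claim_equal_max_operations_correct := by
  intro nums k _
  unfold Spec_max_operations_correct
  rw [A_eq_AG, A_eq_F, B_eq_F]
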